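-- pv_equiv track=rewrite | github.com/mike-rg/Python-JR | 1 - Thousands with commas/thousandswithcommas.py | thausands_with_commas
-- ===== SOURCE A (Python) =====
-- def thausands_with_commas(i):
--     """ Add commas every three decimal places in numbers of four or more
--     digits, counting right to left."""
--     out_of_commas = str(i)
--     retval = ''
--
--     while len(out_of_commas) // 3:
--         three_last_digits = out_of_commas[-3:]
--         with_comma = ',' + three_last_digits
--         # delete tree_last_digits from out_of_commas and process residual
--         out_of_commas = out_of_commas[:-3]
--
--         if len(out_of_commas) == 0:
--             retval = three_last_digits + retval
--
--         else:
--             retval = with_comma + retval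
--
--     # add the residual of out_of_commas
--     retval = out_of_commas + retval
--     return retval
-- ===== SOURCE B (Python) =====
-- def thausands_with_commas(i):
--     """Add commas every three decimal places, counting right to left."""
--     s = str(i)
--     n = len(s)
--     parts = []
--     for idx, ch in enumerate(s):
--         if idx != 0 and (n - idx) % 3 == 0:
--             parts.append(',')
--         parts.append(ch)
--     return ''.join(parts)
-- ===== Notes on version B (the rewrite author's own statement) =====
-- stated objective: simpler
-- what changed: Replaces A's while-loop of repeated right-end slicing and front-prepending with one forward pass over the digit string that inserts a comma at every position idx with idx != 0 and (n - idx) % 3 == 0.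
import Mathlib
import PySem

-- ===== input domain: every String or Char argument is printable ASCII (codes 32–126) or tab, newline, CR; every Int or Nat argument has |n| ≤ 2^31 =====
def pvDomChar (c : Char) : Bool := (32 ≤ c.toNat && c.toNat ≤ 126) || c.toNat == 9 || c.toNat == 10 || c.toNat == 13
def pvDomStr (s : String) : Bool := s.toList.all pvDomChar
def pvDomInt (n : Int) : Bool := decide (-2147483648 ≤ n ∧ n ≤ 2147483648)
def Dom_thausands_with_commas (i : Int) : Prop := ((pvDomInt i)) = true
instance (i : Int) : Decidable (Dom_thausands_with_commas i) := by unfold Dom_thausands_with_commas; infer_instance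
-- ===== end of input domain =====

-- B replaces A's while-loop of repeated right-end slicing and front-prepending with one
-- forward pass that inserts a comma before index idx whenever idx ≠ 0 and (n-idx) % 3 == 0 (simpler).


-- ===== PORT A =====
-- A's while loop: state (out_of_commas, retval); the guard `len(out_of_commas) // 3` is truthy ↔ ≠ 0
def pvALoop (out_of_commas : List Char) (retval : List Char) : List Char :=
  if out_of_commas.length / 3 ≠ 0 then
    let three_last_digits := PySem.List.slice out_of_commas (some (-3)) none
    let with_comma := ',' :: three_last_digits
    let out' := PySem.List.slice out_of_commas none (some (-3))
    let retval' := if out'.length = 0 then three_last_digits ++ retval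
                   else with_comma ++ retval
    pvALoop out' retval'
  else out_of_commas ++ retval
termination_by out_of_commas.length
decreasing_by
  rw [PySem.List.slice_to_neg_ofNat out_of_commas 3 (by omega)]
  simp only [List.length_take]
  omega

def thausands_with_commas (i : Int) : String :=
  String.ofList (pvALoop (PySem.Int.toChars i) [])

-- ===== PORT B =====
def thausands_with_commas_alt (i : Int) : String :=
  let s := PySem.Int.toChars i
  let n := s.length
  let parts := (PySem.List.enumerate s 0).foldl (fun acc p =>
    let acc := if p.1 ≠ 0 ∧ PySem.Int.mod ((n : Int) - p.1) 3 = 0 then acc ++ [','] else acc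
    acc ++ [p.2]) []
  String.ofList parts

-- ===== PRECONDITION & SPEC =====
def Spec_thausands_with_commas (i : Int) (out : String) : Prop := out = thausands_with_commas_alt i
instance (i : Int) (out : String) : Decidable (Spec_thausands_with_commas i out) := by unfold Spec_thausands_with_commas; infer_instance

-- ===== CLAIM (what is proved, stated in full; the proofs are below) =====
def Claim_equal_thausands_with_commas : Prop := ∀ (i : Int), Dom_thausands_with_commas i → Spec_thausands_with_commas i (thausands_with_commas i)

-- ===== LEMMAS AND PROOFS =====

-- the piece B contributes for entry (idx, ch) of a string of length n
def pvPiece (n : Nat) (p : Int × Char) : List Char :=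
  (if p.1 ≠ 0 ∧ PySem.Int.mod ((n : Int) - p.1) 3 = 0 then [','] else []) ++ [p.2]

-- B's value on the whole character list
def pvBVal (s : List Char) : List Char :=
  (PySem.List.enumerate s 0).flatMap (pvPiece s.length)

lemma pvB_foldl_eq_flatMap (n : Nat) (l : List (Int × Char)) (acc : List Char) :
    l.foldl (fun acc p =>
      let acc := if p.1 ≠ 0 ∧ PySem.Int.mod ((n : Int) - p.1) 3 = 0 then acc ++ [','] else acc
      acc ++ [p.2]) acc = acc ++ l.flatMap (pvPiece n) := by
  have h : (fun (acc : List Char) (p : Int × Char) =>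
      let acc := if p.1 ≠ 0 ∧ PySem.Int.mod ((n : Int) - p.1) 3 = 0 then acc ++ [','] else acc
      acc ++ [p.2]) = fun acc p => acc ++ pvPiece n p := by
    funext acc p
    simp only [pvPiece]
    split_ifs <;> simp
  rw [h, PySem.List.foldl_append_eq_flatMap]

-- indices in `enumerate s 0` are < s.length, so the condition is stable under n ↦ n + 3
lemma pvFlatMap_front (n : Nat) (s : List Char) (_hle : s.length ≤ n) :
    (PySem.List.enumerate s 0).flatMap (pvPiece (n + 3)) =
      (PySem.List.enumerate s 0).flatMap (pvPiece n) := by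
  unfold List.flatMap
  congr 1
  apply List.map_congr_left
  intro p hp
  obtain ⟨k, hk, rfl⟩ := (PySem.List.mem_enumerate_iff _ _ _).1 hp
  simp only [pvPiece]
  have : PySem.Int.mod ((↑(n + 3) : Int) - (0 + (k : Int))) 3
       = PySem.Int.mod ((n : Int) - (0 + (k : Int))) 3 := by
    rw [PySem.Int.mod_eq_emod_of_pos (by omega), PySem.Int.mod_eq_emod_of_pos (by omega)]
    push_cast
    omega
  rw [this]

-- on a list shorter than 3 characters no comma fires
lemma pvBVal_short (s : List Char) (h : s.length < 3) : pvBVal s = s := by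
  unfold pvBVal
  have : ∀ p ∈ PySem.List.enumerate s 0, pvPiece s.length p = [p.2] := by
    intro p hp
    obtain ⟨k, hk, rfl⟩ := (PySem.List.mem_enumerate_iff _ _ _).1 hp
    simp only [pvPiece]
    have hfalse : ¬ ((0 + (k : Int)) ≠ 0 ∧
        PySem.Int.mod ((s.length : Int) - (0 + (k : Int))) 3 = 0) := by
      rw [PySem.Int.mod_eq_emod_of_pos (by omega)]
      rintro ⟨hk0, hmod⟩
      have : (k : Int) ≠ 0 := by simpa using hk0
      omega
    rw [if_neg hfalse]
    simp
  have step1 : (PySem.List.enumerate s 0).flatMap (pvPiece s.length)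
      = (PySem.List.enumerate s 0).flatMap (fun p => [p.2]) := by
    unfold List.flatMap; congr 1; exact List.map_congr_left this
  rw [step1]
  have := PySem.List.map_snd_enumerate s 0
  simpa [List.map_eq_flatMap] using this

-- the three last characters contribute (comma iff something precedes) ++ themselves
lemma pvFlatMap_last3 (m : Nat) (a b c : Char) :
    (PySem.List.enumerate [a, b, c] (m : Int)).flatMap (pvPiece (m + 3)) =
      (if m = 0 then [] else [',']) ++ [a, b, c] := by
  simp only [PySem.List.enumerate_cons, PySem.List.enumerate_nil, List.flatMap_cons,
    List.flatMap_nil, pvPiece]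
  have h3 : PySem.Int.mod ((↑(m + 3) : Int) - (m : Int)) 3 = 0 := by
    rw [PySem.Int.mod_eq_emod_of_pos (by omega)]; push_cast; omega
  have h2 : PySem.Int.mod ((↑(m + 3) : Int) - ((m : Int) + 1)) 3 = 2 := by
    rw [PySem.Int.mod_eq_emod_of_pos (by omega)]; push_cast; omega
  have h1 : PySem.Int.mod ((↑(m + 3) : Int) - ((m : Int) + 1 + 1)) 3 = 1 := by
    rw [PySem.Int.mod_eq_emod_of_pos (by omega)]; push_cast; omega
  rw [h3, h2, h1]
  by_cases hm : m = 0
  · simp [hm]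
  · simp [hm]

-- splitting off the last three characters on the B side
lemma pvBVal_split (s : List Char) (h : 3 ≤ s.length) :
    pvBVal s = pvBVal (s.take (s.length - 3)) ++
      (if (s.take (s.length - 3)).length = 0 then [] else [',']) ++ s.drop (s.length - 3) := by
  have hlen3 : (s.drop (s.length - 3)).length = 3 := by simp; omega
  obtain ⟨a, b, c, habc⟩ := List.length_eq_three.1 hlen3
  have hsplit : s = s.take (s.length - 3) ++ s.drop (s.length - 3) := (List.take_append_drop _ s).symm
  have hfl : (s.take (s.length - 3)).length = s.length - 3 := by simp
  conv_lhs => rw [pvBVal, hsplit]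
  rw [PySem.List.enumerate_append, List.flatMap_append]
  have hslen : (s.take (s.length - 3) ++ s.drop (s.length - 3)).length
      = (s.take (s.length - 3)).length + 3 := by
    rw [List.length_append, hlen3]
  rw [hslen, habc]
  rw [pvFlatMap_front _ _ (le_refl _)]
  have : ((0 : Int) + ↑(s.take (s.length - 3)).length) = ((s.take (s.length - 3)).length : Int) := by
    omega
  rw [this, pvFlatMap_last3]
  simp [pvBVal, List.append_assoc]

-- main loop invariant: A's loop computes B's value, prepended to the accumulator
lemma pvALoop_eq (s : List Char) (acc : List Char) :
    pvALoop s acc = pvBVal s ++ acc := by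
  induction s using (measure List.length).wf.induction generalizing acc with
  | _ s ih =>
  rw [pvALoop]
  by_cases h : s.length / 3 ≠ 0
  · rw [if_pos h]
    have h3 : 3 ≤ s.length := by omega
    simp only [PySem.List.slice_from_neg_ofNat s 3 (by omega),
      PySem.List.slice_to_neg_ofNat s 3 (by omega)]
    rw [ih (s.take (s.length - 3)) (by show (s.take (s.length - 3)).length < s.length; simp; omega)]
    rw [pvBVal_split s h3]
    split_ifs with h0 <;>
      simp only [List.append_assoc, List.append_nil, List.nil_append, List.cons_append]
  · rw [if_neg h]
    rw [pvBVal_short s (by omega)]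

theorem thausands_with_commas_spec : Claim_equal_thausands_with_commas := by
  intro i _
  unfold Spec_thausands_with_commas
  simp only [thausands_with_commas, thausands_with_commas_alt]
  rw [pvALoop_eq, pvB_foldl_eq_flatMap]
  simp [pvBVal]
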